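-- pv_equiv track=rewrite | github.com/YorkBen/projects | NLP/MedicalRecord/NER_RE/Data/genTrainData.py | merge_text_length
-- ===== SOURCE A (Python) =====
-- def merge_text_length(text_lens, n):
--     """
--     将文本长度数组合并至长度为n
--     """
--     while len(text_lens) > n:
--         minpos = text_lens.index(min(text_lens))
--         text_lens_merge = []
--         if minpos == 0:
--             text_lens_merge.append(text_lens[0] + text_lens[1])
--             text_lens_merge.extend(text_lens[2:])
--         elif minpos == len(text_lens) - 1:
--             text_lens_merge.extend(text_lens[:-2])
--             text_lens_merge.append(text_lens[-2] + text_lens[-1])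
--         elif text_lens[minpos-1] <= text_lens[minpos+1]:
--             text_lens_merge.extend(text_lens[:minpos-1])
--             text_lens_merge.append(text_lens[minpos-1] + text_lens[minpos])
--             text_lens_merge.extend(text_lens[minpos+1:])
--         else:
--             text_lens_merge.extend(text_lens[:minpos])
--             text_lens_merge.append(text_lens[minpos] + text_lens[minpos+1])
--             text_lens_merge.extend(text_lens[minpos+2:])
--
--         text_lens = text_lens_merge
--
--     return text_lens
-- ===== SOURCE B (Python) =====
-- def _insort(cand, item):
--     """insert item into the sorted worklist, before the first entry >= item"""
--     k = 0
--     while k < len(cand) and cand[k] < item: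
--         k += 1
--     cand.insert(k, item)
--
--
-- def merge_text_length(text_lens, n):
--     """
--     将文本长度数组合并至长度为n
--     """
--     m = len(text_lens)
--     val = list(text_lens)
--     alive = [True] * m
--     cand = []                      # sorted worklist of (value, id); stale entries are skipped lazily
--     for i, v in enumerate(text_lens):
--         _insort(cand, (v, i))
--     cnt = m
--     while cnt > n:
--         v, i = cand.pop(0)
--         if not alive[i] or v != val[i]:
--             continue               # stale entry
--         p = i - 1                  # nearest live neighbour on the left
--         while p >= 0 and not alive[p]:
--             p -= 1
--         q = i + 1                  # nearest live neighbour on the right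
--         while q < m and not alive[q]:
--             q += 1
--         if p < 0:
--             a, b = i, q
--         elif q >= m or val[p] <= val[q]:
--             a, b = p, i
--         else:
--             a, b = i, q
--         val[a] += val[b]
--         alive[b] = False
--         _insort(cand, (val[a], a))
--         cnt -= 1
--     return [val[i] for i in range(m) if alive[i]]
-- ===== Notes on version B (the rewrite author's own statement) =====
-- stated objective: alternative
-- what changed: A rescans the whole list every round (min, index, four-branch slice rebuild); B sorts all (value, id) pairs once into a worklist, pops candidates with lazy invalidation against a value/tombstone array, finds merge partners by neighbour scans over the tombstones, and merges in place, reading the result off at the end.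
-- outside the precondition, e.g. on merge_text_length([5], 0): A raises IndexError, B raises IndexError; on merge_text_length([], -1): A raises ValueError, B raises IndexError
import Mathlib
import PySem

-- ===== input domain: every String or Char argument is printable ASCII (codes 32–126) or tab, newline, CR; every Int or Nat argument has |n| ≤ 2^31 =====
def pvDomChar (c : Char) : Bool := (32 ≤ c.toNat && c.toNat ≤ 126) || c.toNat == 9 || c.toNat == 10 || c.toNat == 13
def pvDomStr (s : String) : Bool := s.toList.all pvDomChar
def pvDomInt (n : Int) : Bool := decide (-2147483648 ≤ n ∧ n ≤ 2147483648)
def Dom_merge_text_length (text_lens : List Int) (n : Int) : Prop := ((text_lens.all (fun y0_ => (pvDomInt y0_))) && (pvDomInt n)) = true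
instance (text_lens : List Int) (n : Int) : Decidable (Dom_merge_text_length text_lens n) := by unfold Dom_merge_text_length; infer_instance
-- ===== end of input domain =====

-- B replaces A's per-round rescan (min + index + full slice rebuild) by a sorted worklist of
-- (value, id) pairs with lazy invalidation plus a tombstone array with neighbour scans
-- (objective: alternative algorithm/data structure; same asymptotic cost).

-- ===== PORT A =====
-- one iteration of A's while-loop body; `=> xs` arms mark where the Python raises (excluded by Pre_)
def pvStepA (xs : List Int) : List Int :=
  match PySem.List.min? xs (fun x => x) with
  | none => xs          -- min([]) raises ValueError
  | some m =>
    match PySem.List.index? xs m with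
    | none => xs        -- unreachable: m ∈ xs
    | some p =>
      if p = 0 then
        match PySem.List.pyGet? xs 0, PySem.List.pyGet? xs 1 with
        | some x0, some x1 => (x0 + x1) :: PySem.List.slice xs (some 2) none
        | _, _ => xs    -- xs[1] raises IndexError on a singleton
      else if (p : Int) = (xs.length : Int) - 1 then
        match PySem.List.pyGet? xs (-2), PySem.List.pyGet? xs (-1) with
        | some a, some b => PySem.List.slice xs none (some (-2)) ++ [a + b]
        | _, _ => xs
      else
        match PySem.List.pyGet? xs ((p : Int) - 1), PySem.List.pyGet? xs (p : Int), PySem.List.pyGet? xs ((p : Int) + 1) with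
        | some xm1, some x0, some x1 =>
          if xm1 ≤ x1 then
            PySem.List.slice xs none (some ((p : Int) - 1)) ++ [xm1 + x0] ++ PySem.List.slice xs (some ((p : Int) + 1)) none
          else
            PySem.List.slice xs none (some (p : Int)) ++ [x0 + x1] ++ PySem.List.slice xs (some ((p : Int) + 2)) none
        | _, _, _ => xs

-- the while-loop; fuel (initial length + 1) only makes the recursion total: within Pre_
-- each round shortens the list by one, so the guard `len ≤ n` is reached before fuel runs out
def pvLoopA : Nat → List Int → Int → List Int
  | 0, xs, _ => xs
  | f + 1, xs, n => if n < (xs.length : Int) then pvLoopA f (pvStepA xs) n else xs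

def merge_text_length (text_lens : List Int) (n : Int) : List Int :=
  pvLoopA (text_lens.length + 1) text_lens n


-- ===== PORT B =====
-- Python's tuple comparison (v, i) < (v', i'): lexicographic
def pvPairLt (x y : Int × Int) : Bool := decide (x.1 < y.1) || (x.1 == y.1 && decide (x.2 < y.2))

-- _insort: the while loop walks k to the first entry ≥ item; list.insert puts item there
def pvInsort (cand : List (Int × Int)) (item : Int × Int) : List (Int × Int) :=
  match cand with
  | [] => [item]
  | c :: cs => if pvPairLt c item then c :: pvInsort cs item else item :: c :: cs

-- `while p >= 0 and not alive[p]: p -= 1`, with p started at t : Nat; -1 = ran off the left end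
def pvScanPrevN (alive : List Bool) : Nat → Int
  | 0 => if alive.getD 0 false then 0 else -1
  | t + 1 => if alive.getD (t + 1) false then (t : Int) + 1 else pvScanPrevN alive t

-- `p = i - 1` followed by the scan (i = 0 starts at p = -1: the loop body never runs)
def pvScanPrev (alive : List Bool) (i : Nat) : Int :=
  match i with
  | 0 => -1
  | t + 1 => pvScanPrevN alive t

-- `q = i + 1; while q < m and not alive[q]: q += 1` (returns m when it runs off the right end)
def pvScanNextN (alive : List Bool) (m : Nat) (q : Nat) : Nat :=
  if h : q < m then (if alive.getD q false then q else pvScanNextN alive m (q + 1)) else m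
  termination_by m - q

-- B's while-loop; fuel only makes the recursion total (each pass consumes one worklist entry and
-- each merge adds back one, so 2*m+1 passes suffice within Pre_). Indexing by i.toNat/getD is
-- faithful: every id the worklist ever holds is in range 0..m-1 in the Python run.
def pvLoopB : Nat → List Int → List Bool → List (Int × Int) → Int → Int → List Int × List Bool
  | 0, val, alive, _, _, _ => (val, alive)
  | f + 1, val, alive, cand, cnt, n =>
    if cnt ≤ n then (val, alive)
    else
      match cand with
      | [] => (val, alive)       -- cand.pop(0) raises IndexError
      | (v, i) :: cand' =>
        if !(alive.getD i.toNat false) || v != val.getD i.toNat 0 then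
          pvLoopB f val alive cand' cnt n          -- stale entry: continue
        else
          let m := alive.length
          let p := pvScanPrev alive i.toNat
          let q := pvScanNextN alive m (i.toNat + 1)
          let ab : Nat × Nat :=
            if p < 0 then (i.toNat, q)
            else if m ≤ q ∨ val.getD p.toNat 0 ≤ val.getD q 0 then (p.toNat, i.toNat)
            else (i.toNat, q)
          let s := val.getD ab.1 0 + val.getD ab.2 0
          pvLoopB f (val.set ab.1 s) (alive.set ab.2 false) (pvInsort cand' (s, ab.1)) (cnt - 1) n

def merge_text_length_alt (text_lens : List Int) (n : Int) : List Int :=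
  let m := text_lens.length
  let cand0 := (PySem.List.enumerate text_lens 0).foldl (fun c vi => pvInsort c (vi.2, vi.1)) []
  let st := pvLoopB (2 * m + 1) text_lens (List.replicate m true) cand0 (m : Int) n
  ((List.range m).filter (fun i => st.2.getD i false)).map (fun i => st.1.getD i 0)

-- ===== PRECONDITION & SPEC =====
-- Pre_ excludes exactly the inputs on which A raises: with n ≤ 0 and a list longer than n the
-- loop shrinks the list to a singleton / empty and min()/indexing raises.
def Pre_merge_text_length (text_lens : List Int) (n : Int) : Prop :=
  1 ≤ n ∨ (text_lens.length : Int) ≤ n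
instance (text_lens : List Int) (n : Int) : Decidable (Pre_merge_text_length text_lens n) := by
  unfold Pre_merge_text_length; infer_instance

def pvWitness_merge_text_length : List Int × Int := ([3, 1, 2, 5], 2)

def Spec_merge_text_length (text_lens : List Int) (n : Int) (out : List Int) : Prop := out = merge_text_length_alt text_lens n
instance (text_lens : List Int) (n : Int) (out : List Int) : Decidable (Spec_merge_text_length text_lens n out) := by unfold Spec_merge_text_length; infer_instance

-- ===== CLAIM (what is proved, stated in full; the proofs are below) =====
def Claim_equal_merge_text_length : Prop := ∀ (text_lens : List Int) (n : Int), Dom_merge_text_length text_lens n → Pre_merge_text_length text_lens n → Spec_merge_text_length text_lens n (merge_text_length text_lens n)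

-- ===== LEMMAS AND PROOFS =====

-- proof-side abstractions ------------------------------------------------------------------
-- the live ids, in order
def pvS (alive : List Bool) : List Nat := (List.range alive.length).filter (fun i => alive.getD i false)
-- the list A is working on, read off B's state
def pvAbs (val : List Int) (alive : List Bool) : List Int := (pvS alive).map (fun j => val.getD j 0)
-- lexicographic ≤ on worklist entries
def pvLe (x y : Int × Int) : Prop := x.1 < y.1 ∨ (x.1 = y.1 ∧ x.2 ≤ y.2)

-- the simulation invariant
structure PVInv (val : List Int) (alive : List Bool) (cand : List (Int × Int)) : Prop where
  hval : val.length = alive.length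
  hsorted : List.Pairwise pvLe cand
  hbound : ∀ e ∈ cand, 0 ≤ e.2 ∧ e.2 < (alive.length : Int)
  hcover : ∀ j ∈ pvS alive, (val.getD j 0, (j : Int)) ∈ cand

theorem pvLe_total (x y : Int × Int) : pvLe x y ∨ pvLe y x := by
  unfold pvLe; omega

theorem pvPairLt_true_le {x y : Int × Int} (h : pvPairLt x y = true) : pvLe x y := by
  simp only [pvPairLt, Bool.or_eq_true_iff, Bool.and_eq_true_iff, decide_eq_true_eq,
    beq_iff_eq] at h
  unfold pvLe; omega

theorem pvPairLt_false_le {x y : Int × Int} (h : pvPairLt x y = false) : pvLe y x := by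
  simp only [pvPairLt, Bool.or_eq_false_iff, Bool.and_eq_false_iff, decide_eq_false_iff_not,
    beq_eq_false_iff_ne, ne_eq] at h
  unfold pvLe; omega

theorem mem_pvInsort (l : List (Int × Int)) (x y : Int × Int) :
    y ∈ pvInsort l x ↔ y = x ∨ y ∈ l := by
  induction l with
  | nil => simp [pvInsort]
  | cons c cs ih =>
    unfold pvInsort
    split_ifs with h
    · simp only [List.mem_cons, ih]; tauto
    · simp only [List.mem_cons]

theorem length_pvInsort (l : List (Int × Int)) (x : Int × Int) :
    (pvInsort l x).length = l.length + 1 := by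
  induction l with
  | nil => rfl
  | cons c cs ih => unfold pvInsort; split_ifs <;> simp [ih]

theorem pairwise_pvInsort {l : List (Int × Int)} (x : Int × Int)
    (h : List.Pairwise pvLe l) : List.Pairwise pvLe (pvInsort l x) := by
  induction l with
  | nil => simp [pvInsort]
  | cons c cs ih =>
    rcases List.pairwise_cons.mp h with ⟨hc, hcs⟩
    unfold pvInsort
    split_ifs with hlt
    · refine List.pairwise_cons.mpr ⟨?_, ih hcs⟩
      intro y hy
      rcases (mem_pvInsort cs x y).mp hy with rfl | hy
      · exact pvPairLt_true_le hlt
      · exact hc y hy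
    · refine List.pairwise_cons.mpr ⟨?_, h⟩
      intro y hy
      rcases List.mem_cons.mp hy with rfl | hy
      · exact pvPairLt_false_le (Bool.eq_false_iff.mpr hlt)
      · rcases pvLe_total x y with h1 | h1
        · exact h1
        · -- x ≤ c ≤ y and y ≤ x: still fine, pvLe is total but we need pvLe x y; use transitivity facts
          have hxc := pvPairLt_false_le (Bool.eq_false_iff.mpr hlt)
          have hcy := hc y hy
          unfold pvLe at *; omega

-- getD / set facts ---------------------------------------------------------------------
theorem pvGetD_set_ne (l : List Int) (i k : Nat) (x d : Int) (h : k ≠ i) :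
    (l.set i x).getD k d = l.getD k d := by
  simp [List.getD_eq_getElem?_getD, List.getElem?_set, h.symm]

theorem pvGetD_set_self (l : List Int) (i : Nat) (x d : Int) (h : i < l.length) :
    (l.set i x).getD i d = x := by
  simp [List.getD_eq_getElem?_getD, h]

theorem pvGetD_eq_getElem (l : List Int) (i : Nat) (h : i < l.length) : l.getD i 0 = l[i] :=
  List.getD_eq_getElem l 0 h

-- pvS facts ------------------------------------------------------------------------------
theorem pvS_pairwise (alive : List Bool) : (pvS alive).Pairwise (· < ·) :=
  List.Pairwise.filter _ List.pairwise_lt_range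

theorem mem_pvS (alive : List Bool) (j : Nat) :
    j ∈ pvS alive ↔ j < alive.length ∧ alive.getD j false = true := by
  simp [pvS, List.mem_filter, List.mem_range]

theorem pvS_getElem_lt (alive : List Bool) {a b : Nat} (ha : a < (pvS alive).length)
    (hb : b < (pvS alive).length) (hab : a < b) : (pvS alive)[a] < (pvS alive)[b] :=
  List.pairwise_iff_getElem.mp (pvS_pairwise alive) a b ha hb hab

-- index reflection on the strictly sorted pvS
theorem pvS_getElem_lt_iff (alive : List Bool) {a b : Nat} (ha : a < (pvS alive).length)
    (hb : b < (pvS alive).length) : (pvS alive)[a] < (pvS alive)[b] ↔ a < b := by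
  constructor
  · intro h
    by_contra hab
    rcases Nat.lt_or_ge b a with h1 | h1
    · exact absurd (pvS_getElem_lt alive hb ha h1) (by omega)
    · have : a = b := by omega
      subst this; omega
  · exact pvS_getElem_lt alive ha hb

-- scan lemmas ----------------------------------------------------------------------------
theorem pvScanPrevN_none (alive : List Bool) (t : Nat)
    (h : ∀ k, k ≤ t → alive.getD k false = false) : pvScanPrevN alive t = -1 := by
  induction t with
  | zero =>
    rw [show pvScanPrevN alive 0 = if alive.getD 0 false then (0 : Int) else -1 from rfl,
        h 0 le_rfl]
    simp
  | succ t ih =>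
    rw [show pvScanPrevN alive (t + 1)
        = if alive.getD (t + 1) false then ((t : Int) + 1) else pvScanPrevN alive t from rfl,
      h (t + 1) le_rfl]
    simp only [Bool.false_eq_true, if_false]
    exact ih (fun k hk => h k (by omega))

theorem pvScanPrevN_some (alive : List Bool) (t k : Nat) (hk : k ≤ t)
    (ha : alive.getD k false = true)
    (hmax : ∀ k', k < k' → k' ≤ t → alive.getD k' false = false) :
    pvScanPrevN alive t = (k : Int) := by
  induction t with
  | zero =>
    have : k = 0 := by omega
    subst this
    rw [show pvScanPrevN alive 0 = if alive.getD 0 false then (0 : Int) else -1 from rfl, ha]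
    simp
  | succ t ih =>
    by_cases hkt : k = t + 1
    · subst hkt
      rw [show pvScanPrevN alive (t + 1)
          = if alive.getD (t + 1) false then ((t : Int) + 1) else pvScanPrevN alive t from rfl, ha]
      simp
    · have h1 : alive.getD (t + 1) false = false := hmax _ (by omega) le_rfl
      rw [show pvScanPrevN alive (t + 1)
          = if alive.getD (t + 1) false then ((t : Int) + 1) else pvScanPrevN alive t from rfl, h1]
      simp only [Bool.false_eq_true, if_false]
      exact ih (by omega) (fun k' h1 h2 => hmax k' h1 (by omega))

theorem pvScanNextN_none (alive : List Bool) (m : Nat) :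
    ∀ d q, m ≤ q + d → (∀ k, q ≤ k → k < m → alive.getD k false = false) →
    pvScanNextN alive m q = m := by
  intro d
  induction d with
  | zero =>
    intro q hq h
    rw [pvScanNextN, dif_neg (by omega)]
  | succ d ih =>
    intro q hq h
    rw [pvScanNextN]
    split_ifs with h1 h2
    · rw [h q le_rfl h1] at h2; exact absurd h2 (by simp)
    · exact ih (q + 1) (by omega) (fun k hk => h k (by omega))
    · rfl

theorem pvScanNextN_some (alive : List Bool) (m : Nat) :
    ∀ d q k, m ≤ q + d → q ≤ k → k < m → alive.getD k false = true →
    (∀ k', q ≤ k' → k' < k → alive.getD k' false = false) →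
    pvScanNextN alive m q = k := by
  intro d
  induction d with
  | zero => intro q k hq hqk hkm _ _; omega
  | succ d ih =>
    intro q k hq hqk hkm ha hmin
    rw [pvScanNextN, dif_pos (by omega)]
    by_cases hqk' : q = k
    · subst hqk'; rw [if_pos ha]
    · have h1 : alive.getD q false = false := hmin q le_rfl (by omega)
      rw [h1]
      simp only [Bool.false_eq_true, if_false]
      exact ih (q + 1) k (by omega) (by omega) hkm ha (fun k' h2 h3 => hmin k' (by omega) h3)

-- A's merge index and the splice form of one A-round -------------------------------------
def pvJ (xs : List Int) (p : Nat) : Nat :=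
  if p = 0 then 0
  else if p = xs.length - 1 then p - 1
  else if xs.getD (p - 1) 0 ≤ xs.getD (p + 1) 0 then p - 1 else p

theorem pvStepA_splice (xs : List Int) (v : Int) (p : Nat)
    (hmin : PySem.List.min? xs (fun x => x) = some v)
    (hidx : PySem.List.index? xs v = some p)
    (hlen : 2 ≤ xs.length) :
    pvStepA xs =
      xs.take (pvJ xs p) ++ (xs.getD (pvJ xs p) 0 + xs.getD (pvJ xs p + 1) 0) :: xs.drop (pvJ xs p + 2) := by
  obtain ⟨hpl, hgp, -⟩ := PySem.List.getElem_of_index?_eq_some hidx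
  rw [pvStepA, hmin]
  simp only [hidx]
  by_cases hp0 : p = 0
  · subst hp0
    rw [if_pos rfl]
    have g0 : PySem.List.pyGet? xs 0 = some xs[0] := by
      rw [PySem.List.pyGet?_eq_some_getElem xs (by omega) (by omega)]; simp
    have g1 : PySem.List.pyGet? xs 1 = some xs[1] := by
      rw [PySem.List.pyGet?_eq_some_getElem xs (by omega) (by omega)]; rfl
    have hj : pvJ xs 0 = 0 := by simp [pvJ]
    split
    · rename_i x0 x1 h1 h2
      rw [g0] at h1; rw [g1] at h2
      injection h1 with h1; injection h2 with h2
      subst h1; subst h2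
      rw [show (2 : Int) = ((2 : Nat) : Int) by norm_num, PySem.List.slice_from_natCast, hj,
          List.take_zero, List.nil_append, pvGetD_eq_getElem xs 0 (by omega),
          show (0 : Nat) + 1 = 1 from rfl, pvGetD_eq_getElem xs 1 (by omega)]
      rfl
    · rename_i hbad
      exact (hbad xs[0] xs[1] g0 g1).elim
  · by_cases hpl1 : p = xs.length - 1
    · rw [if_neg hp0, if_pos (by omega)]
      have gm2 : PySem.List.pyGet? xs (-2) = some xs[xs.length - 2] := by
        rw [PySem.List.pyGet?_neg_ofNat _ 2 (by omega) (by omega),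
            List.getElem?_eq_getElem (by omega)]
      have gm1 : PySem.List.pyGet? xs (-1) = some xs[xs.length - 1] := by
        rw [PySem.List.pyGet?_neg_one, List.getLast?_eq_getElem?,
            List.getElem?_eq_getElem (by omega)]
      have hj : pvJ xs p = xs.length - 2 := by
        unfold pvJ; rw [if_neg hp0, if_pos hpl1]; omega
      split
      · rename_i a b h1 h2
        rw [gm2] at h1; rw [gm1] at h2
        injection h1 with h1; injection h2 with h2
        subst h1; subst h2
        rw [PySem.List.slice_to_neg_ofNat _ 2 (by omega), hj,
            pvGetD_eq_getElem xs (xs.length - 2) (by omega),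
            show xs.length - 2 + 1 = xs.length - 1 from by omega,
            pvGetD_eq_getElem xs (xs.length - 1) (by omega),
            show xs.length - 2 + 2 = xs.length from by omega, List.drop_length]
      · rename_i hbad
        exact (hbad xs[xs.length - 2] xs[xs.length - 1] gm2 gm1).elim
    · rw [if_neg hp0, if_neg (by omega)]
      have hi1 : 1 ≤ p := by omega
      have hiu : p + 1 < xs.length := by omega
      have ca : ((p : Nat) : Int) - 1 = ((p - 1 : Nat) : Int) := by omega
      have cb : ((p : Nat) : Int) + 1 = ((p + 1 : Nat) : Int) := by push_cast; ring
      have cc : ((p : Nat) : Int) + 2 = ((p + 2 : Nat) : Int) := by push_cast; ring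
      have ga : PySem.List.pyGet? xs (((p : Nat) : Int) - 1) = some xs[p - 1] := by
        rw [ca, PySem.List.pyGet?_natCast, List.getElem?_eq_getElem (by omega)]
      have gb : PySem.List.pyGet? xs ((p : Nat) : Int) = some xs[p] := by
        rw [PySem.List.pyGet?_natCast, List.getElem?_eq_getElem (by omega)]
      have gc : PySem.List.pyGet? xs (((p : Nat) : Int) + 1) = some xs[p + 1] := by
        rw [cb, PySem.List.pyGet?_natCast, List.getElem?_eq_getElem (by omega)]
      have hda : xs.getD (p - 1) 0 = xs[p - 1] := pvGetD_eq_getElem xs _ (by omega)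
      have hdc : xs.getD (p + 1) 0 = xs[p + 1] := pvGetD_eq_getElem xs _ (by omega)
      split
      · rename_i xm1 x0 x1 h1 h2 h3
        rw [ga] at h1; rw [gb] at h2; rw [gc] at h3
        injection h1 with h1; injection h2 with h2; injection h3 with h3
        subst h1; subst h2; subst h3
        by_cases hcmp : xs[p - 1] ≤ xs[p + 1]
        · have hj : pvJ xs p = p - 1 := by
            unfold pvJ; rw [if_neg hp0, if_neg hpl1, if_pos (by rw [hda, hdc]; exact hcmp)]
          rw [if_pos hcmp, hj, ca, PySem.List.slice_to_natCast, cb,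
              PySem.List.slice_from_natCast,
              show p - 1 + 2 = p + 1 from by omega, show p - 1 + 1 = p from by omega,
              pvGetD_eq_getElem xs (p - 1) (by omega), pvGetD_eq_getElem xs p (by omega)]
          simp
        · have hj : pvJ xs p = p := by
            unfold pvJ; rw [if_neg hp0, if_neg hpl1, if_neg (by rw [hda, hdc]; exact hcmp)]
          rw [if_neg hcmp, hj, PySem.List.slice_to_natCast, cc, PySem.List.slice_from_natCast,
              pvGetD_eq_getElem xs p (by omega), pvGetD_eq_getElem xs (p + 1) (by omega)]
          simp
      · rename_i hbad
        exact (hbad xs[p - 1] xs[p] xs[p + 1] ga gb gc).elim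

-- killing one id in the tombstone array --------------------------------------------------
theorem pvS_set_false (alive : List Bool) (b : Nat) (hb : b < alive.length) :
    pvS (alive.set b false) = (pvS alive).filter (fun k => k ≠ b) := by
  unfold pvS
  rw [List.length_set, List.filter_filter]
  apply List.filter_congr
  intro k hk
  rw [List.mem_range] at hk
  by_cases hkb : k = b
  · subst hkb
    simp [List.getD_eq_getElem?_getD, List.getElem?_set_self, hb]
  · rw [show ((alive.set b false).getD k false) = alive.getD k false from
      by simp [List.getD_eq_getElem?_getD, List.getElem?_set_ne (by omega : b ≠ k)]]
    simp [hkb]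

-- one valid merge round, seen through the abstraction -------------------------------------
theorem pvAbs_merge (val : List Int) (alive : List Bool) (j : Nat) (s : Int)
    (hlen : val.length = alive.length)
    (hj : j + 1 < (pvS alive).length) :
    pvAbs (val.set ((pvS alive)[j]'(by omega)) s) (alive.set ((pvS alive)[j+1]'hj) false)
      = (pvAbs val alive).take j ++ s :: (pvAbs val alive).drop (j + 2) := by
  have hjl : j < (pvS alive).length := by omega
  have hdec : pvS alive =
      (pvS alive).take j ++ (pvS alive)[j] :: (pvS alive)[j+1] :: (pvS alive).drop (j + 2) := by
    have h1 := (List.getElem_cons_drop hjl).symm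
    have h2 := (List.getElem_cons_drop hj).symm
    conv_lhs => rw [← List.take_append_drop j (pvS alive), h1, h2]
  set U := (pvS alive).take j with hU
  set W := (pvS alive).drop (j + 2) with hW
  set a := (pvS alive)[j]'hjl with ha
  set b := (pvS alive)[j+1]'hj with hbdef
  have hPW : (U ++ a :: b :: W).Pairwise (· < ·) := hdec ▸ pvS_pairwise alive
  rw [List.pairwise_append] at hPW
  obtain ⟨-, hPW2, hcross⟩ := hPW
  rw [List.pairwise_cons] at hPW2
  obtain ⟨hagt, hPW3⟩ := hPW2
  rw [List.pairwise_cons] at hPW3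
  obtain ⟨hbgt, -⟩ := hPW3
  have hablt : a < b := hagt b (List.mem_cons_self ..)
  have hab : a ≠ b := Nat.ne_of_lt hablt
  have hbU : b ∉ U := fun h => absurd (hcross b h a (List.mem_cons_self ..)) (by omega)
  have haU : a ∉ U := fun h => absurd (hcross a h a (List.mem_cons_self ..)) (by omega)
  have haW : a ∉ W := fun h => absurd (hbgt a h) (by omega)
  have hbNotW : b ∉ W := fun h => absurd (hbgt b h) (by omega)
  have hbS : b ∈ pvS alive := by
    rw [hdec]
    exact List.mem_append_right _ (List.mem_cons_of_mem a List.mem_cons_self)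
  have haS : a ∈ pvS alive := by
    rw [hdec]
    exact List.mem_append_right _ List.mem_cons_self
  have hbm : b < alive.length := ((mem_pvS alive b).mp hbS).1
  have ham : a < alive.length := ((mem_pvS alive a).mp haS).1
  -- the new live ids
  have hS' : pvS (alive.set b false) = U ++ a :: W := by
    rw [pvS_set_false alive b hbm, hdec, List.filter_append]
    congr 1
    · exact List.filter_eq_self.mpr (fun x hx => by
        simp only [ne_eq, decide_eq_true_eq]
        exact fun h => hbU (h ▸ hx))
    · rw [List.filter_cons, if_pos (by simp [hab]), List.filter_cons, if_neg (by simp),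
          List.filter_eq_self.mpr (fun x hx => by
            simp only [ne_eq, decide_eq_true_eq]
            exact fun h => hbNotW (h ▸ hx))]
  -- both sides elementwise
  unfold pvAbs
  rw [hS', hdec]
  simp only [List.map_append, List.map_cons]
  have hUlenN : U.length = j := by
    rw [hU, List.length_take]; omega
  have htake : ((U.map fun k => val.getD k 0) ++ val.getD a 0 :: val.getD b 0 :: W.map fun k => val.getD k 0).take j
      = U.map fun k => val.getD k 0 := by
    rw [List.take_append_of_le_length (by simp [hUlenN]),
        List.take_of_length_le (by simp [hUlenN])]
  have hdrop : ((U.map fun k => val.getD k 0) ++ val.getD a 0 :: val.getD b 0 :: W.map fun k => val.getD k 0).drop (j + 2)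
      = W.map fun k => val.getD k 0 := by
    rw [show ((U.map fun k => val.getD k 0) ++ val.getD a 0 :: val.getD b 0 :: W.map fun k => val.getD k 0)
        = ((U.map fun k => val.getD k 0) ++ [val.getD a 0, val.getD b 0]) ++ W.map fun k => val.getD k 0 from by simp,
      List.drop_append_of_le_length (by simp [hUlenN]), List.drop_of_length_le (by simp [hUlenN])]
    simp
  rw [htake, hdrop]
  congr 1
  · exact List.map_congr_left (fun x hx => pvGetD_set_ne val a x s 0 (fun h => haU (h ▸ hx)))
  · congr 1
    · exact pvGetD_set_self val a s 0 (by omega)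
    · exact List.map_congr_left (fun x hx => pvGetD_set_ne val a x s 0 (fun h => haW (h ▸ hx)))

-- membership gives an index in the strictly increasing pvS
theorem pvS_mem_getElem (alive : List Bool) {k : Nat} (hk : k ∈ pvS alive) :
    ∃ (q : Nat) (hq : q < (pvS alive).length), (pvS alive)[q] = k :=
  List.mem_iff_getElem.mp hk

theorem pvGetElem_idx_congr {α : Type} (l : List α) {i j : Nat} (h : i = j)
    (hj : j < l.length) : l[i]'(h ▸ hj) = l[j]'hj := by subst h; rfl

-- the left neighbour scan lands on the previous live id
theorem pvScanPrev_eq_of (alive : List Bool) (p : Nat) (hp : p < (pvS alive).length)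
    (hppos : 0 < p) :
    pvScanPrev alive ((pvS alive)[p]) = (((pvS alive)[p-1]'(by omega) : Nat) : Int) := by
  have hlt : (pvS alive)[p-1]'(by omega) < (pvS alive)[p] := pvS_getElem_lt alive (by omega) hp (by omega)
  cases hiN : (pvS alive)[p] with
  | zero => omega
  | succ t =>
    rw [show pvScanPrev alive (t + 1) = pvScanPrevN alive t from rfl]
    apply pvScanPrevN_some alive t _ (by omega)
    · exact ((mem_pvS alive _).mp (List.getElem_mem _)).2
    · intro k' h1 h2 
      by_contra hc
      have hk' : k' ∈ pvS alive := (mem_pvS alive k').mpr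
        ⟨by have := ((mem_pvS alive _).mp (List.getElem_mem hp)).1; omega, by
          cases h : alive.getD k' false
          · exact absurd h hc
          · rfl⟩
      obtain ⟨q, hq, hqe⟩ := pvS_mem_getElem alive hk'
      have h3 : (pvS alive)[p-1]'(by omega) < (pvS alive)[q] := by rw [hqe]; omega
      have h4 : (pvS alive)[q] < (pvS alive)[p] := by rw [hqe]; omega
      rw [pvS_getElem_lt_iff alive (by omega) hq] at h3
      rw [pvS_getElem_lt_iff alive hq hp] at h4
      omega

-- no live id below the leftmost one
theorem pvScanPrev_eq_neg (alive : List Bool) (hp0 : 0 < (pvS alive).length) :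
    pvScanPrev alive ((pvS alive)[0]) = -1 := by
  have hnone : ∀ k, k < (pvS alive)[0] → alive.getD k false = false := by
    intro k hk
    by_contra hc
    have hk' : k ∈ pvS alive := (mem_pvS alive k).mpr
      ⟨by have := ((mem_pvS alive _).mp (List.getElem_mem hp0)).1; omega, by
        cases h : alive.getD k false
        · exact absurd h hc
        · rfl⟩
    obtain ⟨q, hq, hqe⟩ := pvS_mem_getElem alive hk'
    have h4 : (pvS alive)[q] < (pvS alive)[0] := by rw [hqe]; omega
    rw [pvS_getElem_lt_iff alive hq hp0] at h4
    omega
  cases hiN : (pvS alive)[0] with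
  | zero => rfl
  | succ t =>
    rw [show pvScanPrev alive (t + 1) = pvScanPrevN alive t from rfl]
    apply pvScanPrevN_none alive t
    intro k hk
    exact hnone k (by omega)

-- the right neighbour scan lands on the next live id
theorem pvScanNext_eq_of (alive : List Bool) (p : Nat) (hp : p + 1 < (pvS alive).length) :
    pvScanNextN alive alive.length ((pvS alive)[p]'(by omega) + 1) = (pvS alive)[p+1] := by
  have hlt : (pvS alive)[p]'(by omega) < (pvS alive)[p+1] := pvS_getElem_lt alive (by omega) hp (by omega)
  apply pvScanNextN_some alive alive.length (alive.length) _ _ (by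
      have := ((mem_pvS alive _).mp (List.getElem_mem (by omega : p < (pvS alive).length))).1
      omega)
    (by omega) (((mem_pvS alive _).mp (List.getElem_mem hp)).1)
    (((mem_pvS alive _).mp (List.getElem_mem hp)).2)
  intro k' h1 h2
  by_contra hc
  have hk' : k' ∈ pvS alive := (mem_pvS alive k').mpr
    ⟨by have := ((mem_pvS alive _).mp (List.getElem_mem hp)).1; omega, by
      cases h : alive.getD k' false
      · exact absurd h hc
      · rfl⟩
  obtain ⟨q, hq, hqe⟩ := pvS_mem_getElem alive hk'
  have h3 : (pvS alive)[p]'(by omega) < (pvS alive)[q] := by rw [hqe]; omega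
  have h4 : (pvS alive)[q] < (pvS alive)[p+1] := by rw [hqe]; omega
  rw [pvS_getElem_lt_iff alive (by omega) hq] at h3
  rw [pvS_getElem_lt_iff alive hq hp] at h4
  omega

-- no live id above the rightmost one
theorem pvScanNext_eq_len (alive : List Bool) (p : Nat) (hp : p < (pvS alive).length)
    (hlast : p + 1 = (pvS alive).length) :
    pvScanNextN alive alive.length ((pvS alive)[p] + 1) = alive.length := by
  apply pvScanNextN_none alive alive.length (alive.length) _ (by omega)
  intro k h1 h2
  by_contra hc
  have hk' : k ∈ pvS alive := (mem_pvS alive k).mpr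
    ⟨h2, by
      cases h : alive.getD k false
      · exact absurd h hc
      · rfl⟩
  obtain ⟨q, hq, hqe⟩ := pvS_mem_getElem alive hk'
  have h3 : (pvS alive)[p] < (pvS alive)[q] := by rw [hqe]; omega
  rw [pvS_getElem_lt_iff alive hp hq] at h3
  omega

-- A's loop returns as soon as the guard fails
theorem pvLoopA_of_le (fA : Nat) (xs : List Int) (n : Int) (h : (xs.length : Int) ≤ n) :
    pvLoopA fA xs n = xs := by
  cases fA with
  | zero => rfl
  | succ f => rw [pvLoopA, if_neg (by omega)]

theorem pvAbs_length (val : List Int) (alive : List Bool) :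
    (pvAbs val alive).length = (pvS alive).length := by
  simp [pvAbs]

-- one unfolding of B's loop, in its three shapes ------------------------------------------
theorem pvLoopB_stop (f : Nat) (val : List Int) (alive : List Bool) (cand : List (Int × Int))
    (cnt n : Int) (h : cnt ≤ n) : pvLoopB (f + 1) val alive cand cnt n = (val, alive) := by
  rw [pvLoopB.eq_def]
  dsimp only
  rw [if_pos h]

theorem pvLoopB_stale (f : Nat) (val : List Int) (alive : List Bool) (v i : Int)
    (cand' : List (Int × Int)) (cnt n : Int) (hg : ¬ cnt ≤ n)
    (hC : (!(alive.getD i.toNat false) || v != val.getD i.toNat 0) = true) :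
    pvLoopB (f + 1) val alive ((v, i) :: cand') cnt n = pvLoopB f val alive cand' cnt n := by
  rw [pvLoopB.eq_def]
  dsimp only
  rw [if_neg hg, if_pos hC]

theorem pvLoopB_valid (f : Nat) (val : List Int) (alive : List Bool) (v i : Int)
    (cand' : List (Int × Int)) (cnt n : Int) (hg : ¬ cnt ≤ n)
    (hC : (!(alive.getD i.toNat false) || v != val.getD i.toNat 0) = false)
    (a b : Nat)
    (hab : (if pvScanPrev alive i.toNat < 0 then
              ((i.toNat, pvScanNextN alive alive.length (i.toNat + 1)) : Nat × Nat)
            else if alive.length ≤ pvScanNextN alive alive.length (i.toNat + 1) ∨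
                val.getD (pvScanPrev alive i.toNat).toNat 0
                  ≤ val.getD (pvScanNextN alive alive.length (i.toNat + 1)) 0 then
              ((pvScanPrev alive i.toNat).toNat, i.toNat)
            else (i.toNat, pvScanNextN alive alive.length (i.toNat + 1))) = (a, b)) :
    pvLoopB (f + 1) val alive ((v, i) :: cand') cnt n
      = pvLoopB f (val.set a (val.getD a 0 + val.getD b 0)) (alive.set b false)
          (pvInsort cand' (val.getD a 0 + val.getD b 0, (a : Int))) (cnt - 1) n := by
  rw [pvLoopB.eq_def]
  dsimp only
  rw [if_neg hg, hC]
  simp only [Bool.false_eq_true, if_false]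
  rw [hab]

-- the simulation: B's loop tracks A's loop through the abstraction --------------------------
theorem pvLoopB_sim (fB : Nat) :
    ∀ (val : List Int) (alive : List Bool) (cand : List (Int × Int)) (n : Int) (fA : Nat),
    PVInv val alive cand → 1 ≤ n →
    cand.length + (pvS alive).length ≤ fB + n.toNat →
    (pvS alive).length ≤ fA + n.toNat →
    pvAbs (pvLoopB fB val alive cand ((pvS alive).length : Int) n).1
        (pvLoopB fB val alive cand ((pvS alive).length : Int) n).2
      = pvLoopA fA (pvAbs val alive) n := by
  induction fB with
  | zero =>
    intro val alive cand n fA hInv hn hfB hfA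
    rw [show pvLoopB 0 val alive cand ((pvS alive).length : Int) n = (val, alive) from rfl,
        pvLoopA_of_le fA _ n (by rw [pvAbs_length]; omega)]
  | succ f ih =>
    intro val alive cand n fA hInv hn hfB hfA
    by_cases hg : ((pvS alive).length : Int) ≤ n
    · rw [pvLoopB_stop f val alive cand _ n hg,
          pvLoopA_of_le fA _ n (by rw [pvAbs_length]; omega)]
    · have hL2 : 2 ≤ (pvS alive).length := by omega
      have hS0mem : (pvS alive)[0]'(by omega) ∈ pvS alive := List.getElem_mem _
      have hc0 := hInv.hcover _ hS0mem
      cases cand with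
      | nil => simp at hc0
      | cons hd cand' =>
        obtain ⟨v, i⟩ := hd
        by_cases hC : (!(alive.getD i.toNat false) || v != val.getD i.toNat 0) = true
        · -- stale entry: skip it, nothing changes
          rw [pvLoopB_stale f val alive v i cand' _ n hg hC]
          apply ih val alive cand' n fA _ hn (by simp at hfB ⊢; omega) hfA
          refine ⟨hInv.hval, List.Pairwise.of_cons hInv.hsorted, ?_, ?_⟩
          · exact fun e he => hInv.hbound e (List.mem_cons_of_mem _ he)
          · intro k hk
            rcases List.mem_cons.mp (hInv.hcover k hk) with heq | htl
            · exfalso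
              have hkal := ((mem_pvS alive k).mp hk).2
              have h1 : val.getD k 0 = v := congrArg Prod.fst heq
              have h2 : (k : Int) = i := congrArg Prod.snd heq
              have h3 : i.toNat = k := by omega
              rw [h3, hkal, ← h1] at hC
              simp at hC
            · exact htl
        · -- valid entry: one real merge round
          rw [Bool.not_eq_true] at hC
          have hCsplit := hC
          rw [Bool.or_eq_false_iff] at hCsplit
          obtain ⟨hal', hveq'⟩ := hCsplit
          rw [Bool.not_eq_eq_eq_not, Bool.not_false] at hal'
          rw [bne_eq_false_iff_eq] at hveq'
          obtain ⟨hi0, him⟩ := hInv.hbound (v, i) (List.mem_cons_self)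
          dsimp only at hi0 him
          have hiN : i.toNat < alive.length := by omega
          have hicast : ((i.toNat : Nat) : Int) = i := Int.toNat_of_nonneg hi0
          have hiS : i.toNat ∈ pvS alive := (mem_pvS alive i.toNat).mpr ⟨hiN, hal'⟩
          -- the popped pair is the lexicographic minimum over the live ids
          have lexmin : ∀ jj ∈ pvS alive, pvLe (v, i) (val.getD jj 0, (jj : Int)) := by
            intro jj hjj
            rcases List.mem_cons.mp (hInv.hcover jj hjj) with heq | htl
            · have h1 : val.getD jj 0 = v := congrArg Prod.fst heq
              have h2 : ((jj : Nat) : Int) = i := congrArg Prod.snd heq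
              right
              exact ⟨by rw [h1], by rw [h2]⟩
            · exact (List.pairwise_cons.mp hInv.hsorted).1 _ htl
          obtain ⟨p, hp, hSp⟩ := pvS_mem_getElem alive hiS
          have habslen : (pvAbs val alive).length = (pvS alive).length := pvAbs_length val alive
          have habsgetD : ∀ (k : Nat) (hk : k < (pvS alive).length),
              (pvAbs val alive).getD k 0 = val.getD ((pvS alive)[k]'hk) 0 := by
            intro k hk
            rw [pvGetD_eq_getElem _ _ (by omega)]
            unfold pvAbs
            rw [List.getElem_map]
          have hvmem : v ∈ pvAbs val alive := by
            unfold pvAbs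
            exact List.mem_map.mpr ⟨i.toNat, hiS, hveq'.symm⟩
          -- A's min() finds v
          have hminv : PySem.List.min? (pvAbs val alive) (fun x => x) = some v := by
            cases hmin0 : PySem.List.min? (pvAbs val alive) (fun x => x) with
            | none =>
              have := (PySem.List.min?_eq_none_iff _ _).mp hmin0
              rw [this] at habslen
              simp at habslen
              omega
            | some mv =>
              have hmem := PySem.List.min?_mem hmin0
              obtain ⟨jj, hjj, hjv⟩ := List.mem_map.mp hmem
              have hle1 : v ≤ mv := by
                have := lexmin jj hjj
                unfold pvLe at this
                rw [hjv] at this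
                omega
              have hle2 : mv ≤ v := PySem.List.min?_isMin hmin0 v hvmem
              rw [show mv = v from le_antisymm hle2 hle1]
          -- A's index() finds p
          have hidxv : PySem.List.index? (pvAbs val alive) v = some p := by
            apply (PySem.List.index?_eq_some_iff _ _ _).mpr
            refine ⟨(pvAbs val alive).take p, (pvAbs val alive).drop (p + 1), ?_, ?_, ?_⟩
            · have hpx : p < (pvAbs val alive).length := by omega
              have hx : (pvAbs val alive)[p]'hpx = v := by
                unfold pvAbs
                rw [List.getElem_map, hSp]
                exact hveq'.symm
              rw [← hx, List.getElem_cons_drop hpx, List.take_append_drop]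
            · exact List.length_take_of_le (by rw [habslen]; omega)
            · intro hmem
              rw [List.mem_take_iff_getElem] at hmem
              obtain ⟨k, hk, hkv⟩ := hmem
              have hkL : k < (pvS alive).length := by omega
              have hkp : k < p := by omega
              have hxk : val.getD ((pvS alive)[k]'hkL) 0 = v := by
                rw [← hkv]
                unfold pvAbs
                rw [List.getElem_map]
              have hlex := lexmin ((pvS alive)[k]'hkL) (List.getElem_mem hkL)
              rw [hxk] at hlex
              unfold pvLe at hlex
              have hkcast : i ≤ ((pvS alive)[k]'hkL : Int) := by
                dsimp only at hlex
                omega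
              have hlt : (pvS alive)[k]'hkL < (pvS alive)[p]'hp := pvS_getElem_lt alive hkL hp hkp
              rw [hSp] at hlt
              omega
          -- the common finishing move, once the merge pair (a, b) = (S[j], S[j+1]) is known
          suffices hfin : ∀ j (hj1 : j + 1 < (pvS alive).length),
              pvJ (pvAbs val alive) p = j →
              (if pvScanPrev alive i.toNat < 0 then
                  ((i.toNat, pvScanNextN alive alive.length (i.toNat + 1)) : Nat × Nat)
                else if alive.length ≤ pvScanNextN alive alive.length (i.toNat + 1) ∨
                    val.getD (pvScanPrev alive i.toNat).toNat 0
                      ≤ val.getD (pvScanNextN alive alive.length (i.toNat + 1)) 0 then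
                  ((pvScanPrev alive i.toNat).toNat, i.toNat)
                else (i.toNat, pvScanNextN alive alive.length (i.toNat + 1)))
                = ((pvS alive)[j]'(by omega), (pvS alive)[j+1]'hj1) →
              (i.toNat = (pvS alive)[j]'(by omega) ∨ i.toNat = (pvS alive)[j+1]'hj1) →
              pvAbs (pvLoopB (f + 1) val alive ((v, i) :: cand') ((pvS alive).length : Int) n).1
                  (pvLoopB (f + 1) val alive ((v, i) :: cand') ((pvS alive).length : Int) n).2
                = pvLoopA fA (pvAbs val alive) n by
            -- dispatch on p's position to identify the merge pair
            by_cases hp0 : p = 0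
            · subst hp0
              have hscan : pvScanPrev alive i.toNat = -1 := by
                rw [show i.toNat = (pvS alive)[0]'hp from hSp.symm]
                exact pvScanPrev_eq_neg alive (by omega)
              have hnext : pvScanNextN alive alive.length (i.toNat + 1) = (pvS alive)[1]'(by omega) := by
                rw [show i.toNat = (pvS alive)[0]'hp from hSp.symm]
                exact pvScanNext_eq_of alive 0 (by omega)
              apply hfin 0 (by omega)
              · simp [pvJ]
              · rw [hscan, hnext, if_pos (by norm_num), hSp]
              · left; exact hSp.symm
            · have hppos : 0 < p := by omega
              have hscan : pvScanPrev alive i.toNat = (((pvS alive)[p-1]'(by omega) : Nat) : Int) := by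
                rw [show i.toNat = (pvS alive)[p]'hp from hSp.symm]
                exact pvScanPrev_eq_of alive p hp hppos
              by_cases hplast : p + 1 = (pvS alive).length
              · have hnext : pvScanNextN alive alive.length (i.toNat + 1) = alive.length := by
                  rw [show i.toNat = (pvS alive)[p]'hp from hSp.symm]
                  exact pvScanNext_eq_len alive p hp hplast
                have hidx2 : (pvS alive)[p-1+1]'(by omega) = i.toNat :=
                  (pvGetElem_idx_congr (pvS alive) (by omega) hp).trans hSp
                apply hfin (p - 1) (by omega)
                · unfold pvJ
                  rw [if_neg hp0, if_pos (by rw [habslen]; omega)]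
                · rw [hscan, hnext, if_neg (by omega), if_pos (Or.inl le_rfl),
                      Int.toNat_natCast, hidx2]
                · right; exact hidx2.symm
              · have hmid : p + 1 < (pvS alive).length := by omega
                have hnext : pvScanNextN alive alive.length (i.toNat + 1) = (pvS alive)[p+1]'hmid := by
                  rw [show i.toNat = (pvS alive)[p]'hp from hSp.symm]
                  exact pvScanNext_eq_of alive p hmid
                have hqm : (pvS alive)[p+1]'hmid < alive.length :=
                  ((mem_pvS alive _).mp (List.getElem_mem hmid)).1
                by_cases hcmp : val.getD ((pvS alive)[p-1]'(by omega)) 0 ≤ val.getD ((pvS alive)[p+1]'hmid) 0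
                · have hidx2 : (pvS alive)[p-1+1]'(by omega) = i.toNat :=
                    (pvGetElem_idx_congr (pvS alive) (by omega) hp).trans hSp
                  apply hfin (p - 1) (by omega)
                  · unfold pvJ
                    rw [if_neg hp0, if_neg (by rw [habslen]; omega),
                        if_pos (by rw [habsgetD (p-1) (by omega), habsgetD (p+1) (by omega)]; exact hcmp)]
                  · rw [hscan, hnext, if_neg (by omega),
                        if_pos (Or.inr (by rw [Int.toNat_natCast]; exact hcmp)),
                        Int.toNat_natCast, hidx2]
                  · right; exact hidx2.symm
                · apply hfin p hmid
                  · unfold pvJ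
                    rw [if_neg hp0, if_neg (by rw [habslen]; omega),
                        if_neg (by rw [habsgetD (p-1) (by omega), habsgetD (p+1) (by omega)]; exact hcmp)]
                  · rw [hscan, hnext, if_neg (by omega),
                        if_neg (by rw [Int.toNat_natCast]; push_neg; exact ⟨by omega, lt_of_not_ge hcmp⟩),
                        hSp]
                  · left; exact hSp.symm
          -- proof of the finishing move
          intro j hj1 hpvj hIF hior
          have hjl : j < (pvS alive).length := by omega
          have ham : (pvS alive)[j]'hjl < alive.length :=
            ((mem_pvS alive _).mp (List.getElem_mem hjl)).1
          have hbm : (pvS alive)[j+1]'hj1 < alive.length :=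
            ((mem_pvS alive _).mp (List.getElem_mem hj1)).1
          rw [pvLoopB_valid f val alive v i cand' _ n hg hC _ _ hIF]
          cases fA with
          | zero => omega
          | succ fA' =>
            rw [pvLoopA, if_pos (by rw [habslen]; omega)]
            rw [pvStepA_splice (pvAbs val alive) v p hminv hidxv (by omega), hpvj]
            have habs := pvAbs_merge val alive j
              (val.getD ((pvS alive)[j]'hjl) 0 + val.getD ((pvS alive)[j+1]'hj1) 0)
              hInv.hval hj1
            have hS'len : (pvS (alive.set ((pvS alive)[j+1]'hj1) false)).length
                = (pvS alive).length - 1 := by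
              have hLc := congrArg List.length habs
              rw [pvAbs_length] at hLc
              rw [hLc]
              simp [List.length_take, List.length_drop, habslen]
              omega
            have hInv' : PVInv (val.set ((pvS alive)[j]'hjl)
                  (val.getD ((pvS alive)[j]'hjl) 0 + val.getD ((pvS alive)[j+1]'hj1) 0))
                (alive.set ((pvS alive)[j+1]'hj1) false)
                (pvInsort cand'
                  (val.getD ((pvS alive)[j]'hjl) 0 + val.getD ((pvS alive)[j+1]'hj1) 0,
                    ((pvS alive)[j]'hjl : Int))) := by
              refine ⟨by simp [hInv.hval], pairwise_pvInsort _ (List.Pairwise.of_cons hInv.hsorted), ?_, ?_⟩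
              · intro e he
                rcases (mem_pvInsort _ _ e).mp he with rfl | he'
                · refine ⟨?_, ?_⟩ <;> dsimp only
                  · exact Int.natCast_nonneg _
                  · rw [List.length_set]
                    exact_mod_cast ham
                · have := hInv.hbound e (List.mem_cons_of_mem _ he')
                  rw [List.length_set]
                  exact this
              · intro k hk
                rw [pvS_set_false alive _ hbm, List.mem_filter] at hk
                obtain ⟨hkS, hkb'⟩ := hk
                have hkb : k ≠ (pvS alive)[j+1]'hj1 := by simpa using hkb'
                by_cases hka : k = (pvS alive)[j]'hjl
                · subst hka
                  rw [pvGetD_set_self val _ _ 0 (by rw [hInv.hval]; exact ham)]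
                  exact (mem_pvInsort _ _ _).mpr (Or.inl rfl)
                · rw [pvGetD_set_ne val _ k _ 0 hka]
                  rcases List.mem_cons.mp (hInv.hcover k hkS) with heq | htl
                  · exfalso
                    have h2 : ((k : Nat) : Int) = i := congrArg Prod.snd heq
                    have h3 : i.toNat = k := by omega
                    rcases hior with hior | hior
                    · exact hka (h3 ▸ hior)
                    · exact hkb (h3 ▸ hior)
                  · exact (mem_pvInsort _ _ _).mpr (Or.inr htl)
            have hcnt : ((pvS alive).length : Int) - 1
                = ((pvS (alive.set ((pvS alive)[j+1]'hj1) false)).length : Int) := by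
              rw [hS'len]; omega
            rw [hcnt]
            have hmain := ih _ _ _ n fA' hInv' hn
              (by rw [length_pvInsort, hS'len]; simp at hfB; omega)
              (by rw [hS'len]; omega)
            rw [hmain, habs, habsgetD j (by omega), habsgetD (j+1) (by omega)]

-- initial-state facts --------------------------------------------------------------------
theorem pvS_replicate (m : Nat) : pvS (List.replicate m true) = List.range m := by
  unfold pvS
  rw [List.length_replicate]
  apply List.filter_eq_self.mpr
  intro i hi
  rw [List.mem_range] at hi
  simp [List.getD_eq_getElem?_getD, List.getElem?_replicate, hi]

theorem pvMap_getD_range (xs : List Int) :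
    (List.range xs.length).map (fun i => xs.getD i 0) = xs := by
  apply List.ext_getElem (by simp)
  intro k h1 h2
  simp only [List.getElem_map, List.getElem_range]
  exact pvGetD_eq_getElem xs k h2

theorem pvAbs_replicate (xs : List Int) : pvAbs xs (List.replicate xs.length true) = xs := by
  unfold pvAbs
  rw [pvS_replicate, pvMap_getD_range]

theorem pvFold_insort_pairwise (items : List (Int × Int)) :
    ∀ acc, List.Pairwise pvLe acc →
    List.Pairwise pvLe (items.foldl (fun c vi => pvInsort c (vi.2, vi.1)) acc) := by
  induction items with
  | nil => intro acc h; exact h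
  | cons it its ih => intro acc h; exact ih _ (pairwise_pvInsort _ h)

theorem pvFold_insort_mem (items : List (Int × Int)) :
    ∀ acc y, y ∈ items.foldl (fun c vi => pvInsort c (vi.2, vi.1)) acc ↔
      y ∈ acc ∨ ∃ vi ∈ items, y = (vi.2, vi.1) := by
  induction items with
  | nil => intro acc y; simp
  | cons it its ih =>
    intro acc y
    rw [List.foldl_cons, ih, mem_pvInsort]
    simp only [List.mem_cons]
    constructor
    · rintro ((rfl | hy) | ⟨vi, hvi, rfl⟩)
      · exact Or.inr ⟨it, Or.inl rfl, rfl⟩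
      · exact Or.inl hy
      · exact Or.inr ⟨vi, Or.inr hvi, rfl⟩
    · rintro (hy | ⟨vi, (rfl | hvi), rfl⟩)
      · exact Or.inl (Or.inr hy)
      · exact Or.inl (Or.inl rfl)
      · exact Or.inr ⟨vi, hvi, rfl⟩

theorem pvFold_insort_length (items : List (Int × Int)) :
    ∀ acc, (items.foldl (fun c vi => pvInsort c (vi.2, vi.1)) acc).length
      = acc.length + items.length := by
  induction items with
  | nil => intro acc; simp
  | cons it its ih =>
    intro acc
    rw [List.foldl_cons, ih, length_pvInsort, List.length_cons]
    omega

-- B's loop never changes the length of the tombstone array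
theorem pvLoopB_alive_length (fB : Nat) :
    ∀ (val : List Int) (alive : List Bool) (cand : List (Int × Int)) (cnt n : Int),
    (pvLoopB fB val alive cand cnt n).2.length = alive.length := by
  induction fB with
  | zero => intro val alive cand cnt n; rfl
  | succ f ih =>
    intro val alive cand cnt n
    rw [pvLoopB.eq_def]
    dsimp only
    by_cases hg : cnt ≤ n
    · rw [if_pos hg]
    · rw [if_neg hg]
      cases cand with
      | nil => rfl
      | cons hd cand' =>
        obtain ⟨v, i⟩ := hd
        dsimp only
        by_cases hC : (!(alive.getD i.toNat false) || v != val.getD i.toNat 0) = true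
        · rw [if_pos hC]; exact ih _ _ _ _ _
        · rw [Bool.not_eq_true] at hC
          rw [hC]
          simp only [Bool.false_eq_true, if_false]
          rw [ih]
          exact List.length_set ..

theorem pvInv_init (xs : List Int) :
    PVInv xs (List.replicate xs.length true)
      ((PySem.List.enumerate xs 0).foldl (fun c vi => pvInsort c (vi.2, vi.1)) []) := by
  refine ⟨by simp, pvFold_insort_pairwise _ [] (by simp), ?_, ?_⟩
  · intro e he
    rw [pvFold_insort_mem] at he
    rcases he with he | ⟨vi, hvi, rfl⟩
    · simp at he
    · rw [PySem.List.mem_enumerate_iff] at hvi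
      obtain ⟨k, hk, rfl⟩ := hvi
      simp only [List.length_replicate]
      constructor <;> [omega; (push_cast; omega)]
  · intro j hj
    rw [pvS_replicate, List.mem_range] at hj
    rw [pvFold_insort_mem]
    refine Or.inr ⟨((j : Int), xs[j]'hj), ?_, ?_⟩
    · rw [PySem.List.mem_enumerate_iff]
      exact ⟨j, hj, by rw [zero_add]⟩
    · rw [pvGetD_eq_getElem xs j hj]

theorem merge_text_length_spec : Claim_equal_merge_text_length := by
  intro xs n hDom hPre
  unfold Spec_merge_text_length merge_text_length merge_text_length_alt
  dsimp only
  by_cases hle : (xs.length : Int) ≤ n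
  · rw [pvLoopA_of_le _ _ _ hle, pvLoopB_stop _ _ _ _ _ _ hle]
    have hfilt : (List.range xs.length).filter
        (fun i => (List.replicate xs.length true).getD i false) = List.range xs.length := by
      apply List.filter_eq_self.mpr
      intro i hi
      rw [List.mem_range] at hi
      simp [List.getD_eq_getElem?_getD, List.getElem?_replicate, hi]
    rw [hfilt, pvMap_getD_range]
  · have hn : 1 ≤ n := by
      rcases hPre with h | h
      · exact h
      · exact absurd h hle
    have hc : ((pvS (List.replicate xs.length true)).length : Int) = (xs.length : Int) := by
      rw [pvS_replicate, List.length_range]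
    have hsim := pvLoopB_sim (2 * xs.length + 1) xs (List.replicate xs.length true)
      ((PySem.List.enumerate xs 0).foldl (fun c vi => pvInsort c (vi.2, vi.1)) [])
      n (xs.length + 1) (pvInv_init xs) hn
      (by
        rw [pvFold_insort_length _ [], PySem.List.length_enumerate, pvS_replicate,
            List.length_range]
        simp
        omega)
      (by rw [pvS_replicate, List.length_range]; omega)
    rw [hc, pvAbs_replicate] at hsim
    rw [← hsim]
    unfold pvAbs pvS
    rw [pvLoopB_alive_length, List.length_replicate]
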